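-- pv_equiv track=rewrite | github.com/Ricium/AdventOfCode2017 | Common/Common.py | checkPhraseForAnagram
-- ===== SOURCE A (Python) =====
-- def getUniqueWords(words):
--     unique = list(set(words))
--     return unique
--
-- def getCount(unique, word):
--     count = 0
--     for letter in word:
--        if letter == unique:
--            count = count + 1
--     return count
--
-- def isAnagram(a, b):
--     if len(a) == len(b):
--         letters_a = list(a)
--         letters_b = list(b)
--
--         unique_a = getUniqueWords(letters_a)
--         unique_b = getUniqueWords(letters_b)
--
--         if len(unique_a) == len(unique_b):
--             if unique_a.sort() == unique_b.sort():
--                 isSame = True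
--                 for letter in unique_a:
--                     count_a = getCount(letter, a)
--                     count_b = getCount(letter, b)
--                     if count_a != count_b:
--                         isSame = False
--                         break
--                 return isSame
--             else:
--                 return False
--         else:
--             return False
--     else:
--         return False
--
-- def checkPhraseForAnagram(index, word, phrase):
--     foundAnagram = False
--     for x in range(0, len(phrase)):
--         if x != index:
--             foundAnagram = isAnagram(word, phrase[x])
--             if foundAnagram:
--                 break
--     return foundAnagram
-- ===== SOURCE B (Python) =====
-- def checkPhraseForAnagram(index, word, phrase):
--     sig = ''.join(sorted(word))
--     sigs = {''.join(sorted(w)) for i, w in enumerate(phrase) if i != index}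
--     return sig in sigs
-- ===== Notes on version B (the rewrite author's own statement) =====
-- stated objective: simpler
-- what changed: B replaces A's per-candidate length/unique-letters/letter-count comparison with an early-break scan by computing a sorted-letters signature for each word, building the set of signatures of the non-index phrase entries in one pass, and answering with a single set-membership test.
import Mathlib
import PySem

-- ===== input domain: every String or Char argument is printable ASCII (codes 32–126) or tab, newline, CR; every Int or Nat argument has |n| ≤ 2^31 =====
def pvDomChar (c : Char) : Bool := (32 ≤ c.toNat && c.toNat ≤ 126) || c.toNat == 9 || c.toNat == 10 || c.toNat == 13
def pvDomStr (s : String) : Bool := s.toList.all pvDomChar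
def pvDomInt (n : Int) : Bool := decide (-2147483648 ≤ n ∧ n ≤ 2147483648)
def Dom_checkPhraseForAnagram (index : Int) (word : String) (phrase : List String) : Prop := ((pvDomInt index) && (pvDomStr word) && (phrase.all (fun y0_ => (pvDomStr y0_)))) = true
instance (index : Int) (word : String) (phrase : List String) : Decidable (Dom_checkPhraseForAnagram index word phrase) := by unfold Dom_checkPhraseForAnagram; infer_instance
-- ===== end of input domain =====

-- B replaces A's per-candidate compare-and-break scan by one pass building the set of
-- sorted-letter signatures of the other phrase words and a single membership query (objective: simpler).

-- ===== PORT A =====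
def getUniqueWords (words : List Char) : List Char :=
  -- list(set(words)); the result is sorted in place before any order-sensitive use
  PySem.Set.ofList words

def getCount (unique : Char) (word : String) : Int :=
  word.toList.foldl (fun count letter => if letter == unique then count + 1 else count) 0

-- the 'for letter in unique_a: … break' loop of isAnagram
def isAnagramLoop (a b : String) : List Char → Bool
  | [] => true
  | letter :: rest =>
    if getCount letter a ≠ getCount letter b then false else isAnagramLoop a b rest

def isAnagram (a b : String) : Bool :=
  if PySem.Str.len a = PySem.Str.len b then
    let letters_a := a.toList
    let letters_b := b.toList
    let unique_a := getUniqueWords letters_a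
    let unique_b := getUniqueWords letters_b
    if (unique_a.length : Int) = (unique_b.length : Int) then
      -- unique_a.sort() / unique_b.sort(): sort in place, both calls return None, so 'None == None' is True
      let unique_a := PySem.List.sorted unique_a (fun x => x) false
      let _unique_b := PySem.List.sorted unique_b (fun x => x) false
      if ((none : Option Unit) == (none : Option Unit)) then
        isAnagramLoop a b unique_a
      else false
    else false
  else false

-- the 'for x in range(0, len(phrase)): … break' loop, carrying foundAnagram
def cpfaLoop (index : Int) (word : String) (phrase : List String) : List Int → Bool → Bool
  | [], found => found
  | x :: rest, found =>
    if x ≠ index then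
      let found' := isAnagram word (PySem.List.pyGetD phrase x "")
      if found' then found' else cpfaLoop index word phrase rest found'
    else cpfaLoop index word phrase rest found

def checkPhraseForAnagram (index : Int) (word : String) (phrase : List String) : Bool :=
  cpfaLoop index word phrase (PySem.List.pyRange 0 (phrase.length : Int) 1) false

-- ===== PORT B =====
-- ''.join(sorted(w)) — represented by its character list
def pvSignature (w : String) : List Char :=
  PySem.List.sorted w.toList (fun x => x) false

def checkPhraseForAnagram_alt (index : Int) (word : String) (phrase : List String) : Bool :=
  let sig := pvSignature word
  let sigs : PySem.Set (List Char) :=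
    PySem.Set.ofList (((PySem.List.enumerate phrase 0).filter
      (fun p => decide (p.1 ≠ index))).map (fun p => pvSignature p.2))
  PySem.Set.contains sigs sig

-- ===== PRECONDITION & SPEC =====
def Spec_checkPhraseForAnagram (index : Int) (word : String) (phrase : List String) (out : Bool) : Prop := out = checkPhraseForAnagram_alt index word phrase
instance (index : Int) (word : String) (phrase : List String) (out : Bool) : Decidable (Spec_checkPhraseForAnagram index word phrase out) := by unfold Spec_checkPhraseForAnagram; infer_instance

-- ===== CLAIM (what is proved, stated in full; the proofs are below) =====
def Claim_equal_checkPhraseForAnagram : Prop := ∀ (index : Int) (word : String) (phrase : List String), Dom_checkPhraseForAnagram index word phrase → Spec_checkPhraseForAnagram index word phrase (checkPhraseForAnagram index word phrase)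

-- ===== LEMMAS AND PROOFS =====

theorem getCount_eq (c : Char) (w : String) : getCount c w = (w.toList.count c : Int) := by
  unfold getCount
  rw [PySem.List.foldl_beq_add_one]
  simp

theorem isAnagramLoop_eq (a b : String) (l : List Char) :
    isAnagramLoop a b l = l.all (fun c => a.toList.count c == b.toList.count c) := by
  induction l with
  | nil => rfl
  | cons x rest ih =>
    simp only [isAnagramLoop, getCount_eq, List.all_cons, ih]
    by_cases h : a.toList.count x = b.toList.count x <;> simp [h]

theorem isAnagram_eq (a b : String) :
    isAnagram a b = decide (a.toList.Perm b.toList) := by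
  by_cases hp : a.toList.Perm b.toList
  · have hlen : a.toList.length = b.toList.length := hp.length_eq
    have hmem : ∀ c, c ∈ a.toList ↔ c ∈ b.toList := fun c => hp.mem_iff
    have hperm : (PySem.Set.ofList a.toList).Perm (PySem.Set.ofList b.toList) := by
      refine (List.perm_ext_iff_of_nodup (PySem.Set.nodup_ofList _) (PySem.Set.nodup_ofList _)).2 ?_
      intro c; simp [PySem.Set.mem_ofList, hmem c]
    simp only [isAnagram, PySem.Str.len_eq, hlen, hperm.length_eq, getUniqueWords]
    simp only [BEq.rfl, if_pos]
    rw [isAnagramLoop_eq]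
    simp only [hp, decide_true]
    refine List.all_eq_true.2 ?_
    intro c _
    simp [List.Perm.count_eq hp c]
  · simp only [isAnagram, PySem.Str.len_eq, getUniqueWords, hp, decide_false]
    split_ifs with h1 h2 h3
    · -- lengths and distinct counts equal, yet not a permutation: the count loop finds a mismatch
      rw [isAnagramLoop_eq]
      by_contra hall
      apply hp
      rw [List.perm_iff_count]
      intro c
      simp only [Bool.not_eq_false, List.all_eq_true] at hall
      have hcount : ∀ c ∈ a.toList, a.toList.count c = b.toList.count c := by
        intro c hc
        have := hall c (by simp [PySem.List.mem_sorted, PySem.Set.mem_ofList, hc])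
        exact beq_iff_eq.1 this
      -- supports: a's toFinset ⊆ b's, and they have equal card, hence equal
      have hsub : a.toList.toFinset ⊆ b.toList.toFinset := by
        intro c hc
        rw [List.mem_toFinset] at hc ⊢
        have := hcount c hc
        have hpos : 0 < a.toList.count c := List.count_pos_iff.2 hc
        rw [this] at hpos
        exact List.count_pos_iff.1 hpos
      have hcard : a.toList.toFinset.card = b.toList.toFinset.card := by
        have ha : (PySem.Set.ofList a.toList).toFinset = a.toList.toFinset := by
          ext c; simp [PySem.Set.mem_ofList]
        have hb : (PySem.Set.ofList b.toList).toFinset = b.toList.toFinset := by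
          ext c; simp [PySem.Set.mem_ofList]
        have ha' := List.toFinset_card_of_nodup (PySem.Set.nodup_ofList a.toList)
        have hb' := List.toFinset_card_of_nodup (PySem.Set.nodup_ofList b.toList)
        rw [ha] at ha'; rw [hb] at hb'
        omega
      have hfin : a.toList.toFinset = b.toList.toFinset :=
        Finset.eq_of_subset_of_card_le hsub (le_of_eq hcard.symm)
      by_cases hc : c ∈ a.toList
      · exact hcount c hc
      · have hcb : c ∉ b.toList := by
          rw [← List.mem_toFinset, ← hfin, List.mem_toFinset]; exact hc
        rw [List.count_eq_zero_of_not_mem hc, List.count_eq_zero_of_not_mem hcb]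
    all_goals rfl

theorem cpfaLoop_eq (index : Int) (word : String) (phrase : List String) (l : List Int) :
    cpfaLoop index word phrase l false
      = l.any (fun x => decide (x ≠ index) && isAnagram word (PySem.List.pyGetD phrase x "")) := by
  induction l with
  | nil => rfl
  | cons x rest ih =>
    simp only [cpfaLoop, List.any_cons]
    by_cases hx : x ≠ index
    · simp only [if_pos hx]
      cases hA : isAnagram word (PySem.List.pyGetD phrase x "") <;> simp [ih, hx]
    · simp [hx, ih]

theorem checkPhraseForAnagram_eq_alt (index : Int) (word : String) (phrase : List String) :
    checkPhraseForAnagram index word phrase = checkPhraseForAnagram_alt index word phrase := by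
  rw [Bool.eq_iff_iff]
  unfold checkPhraseForAnagram checkPhraseForAnagram_alt
  rw [cpfaLoop_eq]
  rw [PySem.List.enumerate_eq_map_pyRange (d := "")]
  simp only [PySem.Set.contains_iff, PySem.Set.mem_ofList, List.mem_map, List.mem_filter,
    List.any_eq_true, Bool.and_eq_true, decide_eq_true_eq, isAnagram_eq, pvSignature]
  constructor
  · rintro ⟨x, hx, hne, hperm⟩
    exact ⟨(x, PySem.List.pyGetD phrase x ""), ⟨⟨x, hx, rfl⟩, by simpa using hne⟩,
      ((PySem.List.sorted_id_eq_sorted_id_iff_perm _ _).2 hperm.symm)⟩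
  · rintro ⟨p, ⟨⟨x, hx, rfl⟩, hne⟩, hsig⟩
    exact ⟨x, hx, by simpa using hne,
      ((PySem.List.sorted_id_eq_sorted_id_iff_perm _ _).1 hsig).symm⟩

-- ===== VERDICT (by name: the statement is the Claim_ definition above) =====
theorem checkPhraseForAnagram_spec : Claim_equal_checkPhraseForAnagram := by
  intro index word phrase _
  exact checkPhraseForAnagram_eq_alt index word phrase
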